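-- pv_equiv track=rewrite | github.com/Qi021212/DataSphere | sql_compiler/optimizer.py | _split_conjuncts
-- ===== SOURCE A (Python) =====
-- from typing import List, Optional, Set, Tuple, Union
--
-- def _split_conjuncts(pred: str) -> List[str]:
--     """
--     极简 AND 拆分：按小写/大写 AND 分割；不处理括号与 OR（足够覆盖你当前示例）
--     """
--     parts: List[str] = []
--     buf = []
--     tokens = pred.replace("&&", "AND").split()
--     i = 0
--     while i < len(tokens):
--         if tokens[i].upper() == "AND":
--             if buf:
--                 parts.append(" ".join(buf))
--                 buf = []
--         else:
--             buf.append(tokens[i])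
--         i += 1
--     if buf:
--         parts.append(" ".join(buf))
--     return [p.strip() for p in parts if p.strip()]
-- ===== SOURCE B (Python) =====
-- from typing import List
--
-- def _split_conjuncts(pred: str) -> List[str]:
--     # Different algorithm: normalize to a single-space string, then split it by
--     # substring search for the padded separator " AND " (case-insensitive via an
--     # uppercased shadow copy), instead of scanning tokens with a buffer.
--     s = " ".join(pred.replace("&&", "AND").split())
--     w = " " + s + " "
--     u = w.upper()
--     parts: List[str] = []
--     pos = 0
--     while True:
--         i = u.find(" AND ", pos)
--         if i == -1:
--             tail = w[pos:].strip()
--             if tail: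
--                 parts.append(tail)
--             return parts
--         piece = w[pos:i].strip()
--         if piece:
--             parts.append(piece)
--         pos = i + 4
-- ===== Notes on version B (the rewrite author's own statement) =====
-- stated objective: alternative
-- what changed: Instead of scanning tokens with a buffer that is flushed at each AND, B joins the tokens back into one single-space normalized string and splits that string by repeated substring search (str.find) for the space-padded separator AND in an uppercased shadow copy, slicing out the pieces between occurrences.
import Mathlib
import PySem

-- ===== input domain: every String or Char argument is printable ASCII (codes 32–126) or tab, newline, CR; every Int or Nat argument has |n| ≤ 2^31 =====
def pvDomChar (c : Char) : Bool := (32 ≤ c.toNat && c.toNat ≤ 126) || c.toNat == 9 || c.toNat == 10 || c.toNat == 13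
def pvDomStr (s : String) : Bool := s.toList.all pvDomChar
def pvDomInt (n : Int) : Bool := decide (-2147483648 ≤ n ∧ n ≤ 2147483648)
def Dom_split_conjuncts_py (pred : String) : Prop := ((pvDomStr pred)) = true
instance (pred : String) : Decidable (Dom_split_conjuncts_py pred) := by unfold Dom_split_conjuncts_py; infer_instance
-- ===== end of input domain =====

-- B replaces A's token-buffer loop by a different algorithm: it normalizes the predicate to a
-- single-space string and splits it by substring search for the padded separator " AND "
-- (case-insensitive via an uppercased shadow copy); objective: alternative, same cost.

-- ===== PORT A =====
def pvIsAnd (t : String) : Bool := PySem.Str.upper t == "AND"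

-- A's while loop over tokens: parts/buf state; buf flushed on AND and at the end.
def pvLoopA : List String → List String → List String
  | [], buf => if buf.isEmpty then [] else [PySem.Str.join " " buf]
  | t :: ts, buf =>
    if pvIsAnd t then
      (if buf.isEmpty then [] else [PySem.Str.join " " buf]) ++ pvLoopA ts []
    else
      pvLoopA ts (buf ++ [t])

-- the final list comprehension's body: p.strip() kept when non-empty
def pvStripA (p : String) : Option String :=
  let s := PySem.Str.strip p
  if s == "" then none else some s

def split_conjuncts_py (pred : String) : List String :=
  (pvLoopA (PySem.Str.split₀ (PySem.Str.replace pred "&&" "AND")) []).filterMap pvStripA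

-- ===== PORT B =====
-- Source B's while loop: u.find(" AND ", pos) plus the w[pos:i] slice, realized as one
-- left-to-right character scan over w: at each position the 5-character window, uppercased
-- on the fly (= the same window of u = w.upper()), is compared with " AND "; acc is the
-- current slice w[pos:i]. Exact because str.find returns the FIRST occurrence at/after pos.
def pvScanB : List Char → List Char → List (List Char)
  | acc, a :: b :: c :: d :: e :: rest =>
    if PySem.Chars.upper [a, b, c, d, e] = [' ', 'A', 'N', 'D', ' '] then
      acc :: pvScanB [] (e :: rest)
    else
      pvScanB (acc ++ [a]) (b :: c :: d :: e :: rest)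
  | acc, rest => [acc ++ rest]
  termination_by _ w => w.length
  decreasing_by all_goals (simp; try omega)

-- each piece: piece.strip(), appended when non-empty
def pvPieceB (p : List Char) : Option String :=
  let t := PySem.Chars.strip p
  if t.isEmpty then none else some (String.ofList t)

def split_conjuncts_py_alt (pred : String) : List String :=
  let tokens := PySem.Str.split₀ (PySem.Str.replace pred "&&" "AND")
  let s := PySem.Str.join " " tokens          -- s = " ".join(...)
  (pvScanB [] (' ' :: s.toList ++ [' '])).filterMap pvPieceB   -- w = " " + s + " "

-- ===== PRECONDITION & SPEC =====
def Spec_split_conjuncts_py (pred : String) (out : List String) : Prop := out = split_conjuncts_py_alt pred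
instance (pred : String) (out : List String) : Decidable (Spec_split_conjuncts_py pred out) := by unfold Spec_split_conjuncts_py; infer_instance

-- ===== CLAIM (what is proved, stated in full; the proofs are below) =====
def Claim_equal_split_conjuncts_py : Prop := ∀ (pred : String), Dom_split_conjuncts_py pred → Spec_split_conjuncts_py pred (split_conjuncts_py pred)

-- ===== LEMMAS AND PROOFS =====

-- a token as produced by str.split(): non-empty, no whitespace characters
def pvTokOk (t : List Char) : Prop := t ≠ [] ∧ ∀ c ∈ t, PySem.Chars.isspace c = false

-- the padded normalized stream " t1 t2 … tn " built token by token (the trailing space shared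
-- with the next separator occurrence)
def pvS : List (List Char) → List Char
  | [] => [' ']
  | t :: rest => ' ' :: t ++ pvS rest

-- what the scan does, phrased over the token list
def pvScanTok : List (List Char) → List Char → List (List Char)
  | [], acc => [acc ++ [' ']]
  | t :: rest, acc =>
    if PySem.Chars.upper t = ['A', 'N', 'D'] then acc :: pvScanTok rest []
    else pvScanTok rest (acc ++ ' ' :: t)

-- buf rendered as the characters of the current piece (a leading space before every token)
def pvCat (T : List (List Char)) : List Char := (T.map (' ' :: ·)).flatten

-- ---- character facts ----

theorem pvUpperChar_ne_space {c : Char} (h : c ≠ ' ') : PySem.Chars.upperChar c ≠ ' ' := by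
  unfold PySem.Chars.upperChar PySem.Chars.islower
  split
  · rename_i hl
    simp only [Bool.and_eq_true, decide_eq_true_eq] at hl
    have h1 : 97 ≤ c.toNat := hl.1
    have h2 : c.toNat ≤ 122 := hl.2
    intro he
    have hv : (c.toNat - 32).isValidChar := Or.inl (by omega)
    have : (Char.ofNat (c.toNat - 32)).toNat = 32 := by rw [he]; rfl
    rw [Char.toNat_ofNat, if_pos hv] at this
    omega
  · exact h

theorem pvUpperChar_space : PySem.Chars.upperChar ' ' = ' ' := by decide

theorem pvNotSpace_of_notSpace {c : Char} (h : PySem.Chars.isspace c = false) : c ≠ ' ' := by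
  intro e; subst e; simp [PySem.Chars.isspace] at h

-- ---- unfolding lemmas for the scan ----

theorem pvScanB_short (acc rest : List Char) (h : rest.length < 5) :
    pvScanB acc rest = [acc ++ rest] := by
  rcases rest with _ | ⟨a, _ | ⟨b, _ | ⟨c, _ | ⟨d, _ | ⟨e, r⟩⟩⟩⟩⟩
  · rw [pvScanB] <;> simp
  · rw [pvScanB] <;> simp
  · rw [pvScanB] <;> simp
  · rw [pvScanB] <;> simp
  · rw [pvScanB] <;> simp
  · simp at h; omega

theorem pvScanB_cons5 (acc : List Char) (a b c d e : Char) (rest : List Char) :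
    pvScanB acc (a :: b :: c :: d :: e :: rest) =
      if PySem.Chars.upper [a, b, c, d, e] = [' ', 'A', 'N', 'D', ' '] then
        acc :: pvScanB [] (e :: rest)
      else
        pvScanB (acc ++ [a]) (b :: c :: d :: e :: rest) := by
  rw [pvScanB]

-- scanning past a non-space character just moves it into the accumulator
theorem pvScanB_cons_nospace {c : Char} (hc : c ≠ ' ') (acc ws : List Char) :
    pvScanB acc (c :: ws) = pvScanB (acc ++ [c]) ws := by
  rcases ws with _ | ⟨b, _ | ⟨d, _ | ⟨e, _ | ⟨f, r⟩⟩⟩⟩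
  · rw [pvScanB_short _ _ (by simp), pvScanB_short _ _ (by simp)]; simp
  · rw [pvScanB_short _ _ (by simp), pvScanB_short _ _ (by simp)]; simp
  · rw [pvScanB_short _ _ (by simp), pvScanB_short _ _ (by simp)]; simp
  · rw [pvScanB_short _ _ (by simp), pvScanB_short _ _ (by simp)]; simp
  · rw [pvScanB_cons5, if_neg]
    intro he
    have : PySem.Chars.upperChar c = ' ' := by
      simpa [PySem.Chars.upper] using congrArg (fun l => l.head?) he
    exact pvUpperChar_ne_space hc this

-- scanning through a run of non-space characters
theorem pvScanB_through (τ : List Char) (hτ : ∀ c ∈ τ, c ≠ ' ') (acc σ : List Char) :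
    pvScanB acc (τ ++ σ) = pvScanB (acc ++ τ) σ := by
  induction τ generalizing acc with
  | nil => simp
  | cons c τ ih =>
    rw [List.cons_append, pvScanB_cons_nospace (hτ c (by simp)) acc (τ ++ σ),
        ih (fun x hx => hτ x (by simp [hx]))]
    simp

-- ---- shape of the stream ----

theorem pvS_head (T : List (List Char)) : ∃ γ, pvS T = ' ' :: γ := by
  cases T <;> simp [pvS]

theorem pvS_shape (T : List (List Char)) (hT : T ≠ []) (hok : ∀ t ∈ T, pvTokOk t) :
    ∃ c d δ, pvS T = ' ' :: c :: d :: δ := by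
  rcases T with _ | ⟨t, rest⟩
  · exact absurd rfl hT
  · obtain ⟨ht, -⟩ := hok t (by simp)
    obtain ⟨c, τ, rfl⟩ := List.exists_cons_of_ne_nil ht
    obtain ⟨γ, hγ⟩ := pvS_head rest
    have hne : τ ++ pvS rest ≠ [] := by rw [hγ]; simp
    obtain ⟨d, δ, hd⟩ := List.exists_cons_of_ne_nil hne
    exact ⟨c, d, δ, by simp [pvS, hd]⟩

-- scanning a separator space followed by a non-AND token absorbs " " ++ token into acc
theorem pvScanB_space_tok (t : List Char) (rest : List (List Char)) (ht : t ≠ [])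
    (hts : ∀ c ∈ t, c ≠ ' ') (hA : PySem.Chars.upper t ≠ ['A', 'N', 'D'])
    (hokr : ∀ u ∈ rest, pvTokOk u) (acc : List Char) :
    pvScanB acc (' ' :: t ++ pvS rest) = pvScanB (acc ++ ' ' :: t) (pvS rest) := by
  rcases t with _ | ⟨t0, t⟩
  · exact absurd rfl ht
  rcases t with _ | ⟨t1, t⟩
  · -- t = [t0]
    rcases rest with _ | ⟨u, r⟩
    · rw [show (' ' :: [t0] ++ pvS []) = [' ', t0, ' '] from by simp [pvS],
          pvScanB_short _ _ (by simp), pvScanB_short _ _ (by simp [pvS])]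
      simp [pvS]
    · obtain ⟨c, d, δ, hδ⟩ := pvS_shape (u :: r) (by simp) hokr
      rw [show (' ' :: [t0] ++ pvS (u :: r)) = ' ' :: t0 :: ' ' :: c :: d :: δ from by simp [hδ],
          pvScanB_cons5, if_neg (by simp [PySem.Chars.upper, pvUpperChar_space, Char.ext_iff]),
          pvScanB_cons_nospace (hts t0 (by simp))]
      rw [show (' ' :: c :: d :: δ) = pvS (u :: r) from hδ.symm]
      simp
  rcases t with _ | ⟨t2, t⟩
  · -- t = [t0, t1]
    rcases rest with _ | ⟨u, r⟩
    · rw [show (' ' :: [t0, t1] ++ pvS []) = [' ', t0, t1, ' '] from by simp [pvS],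
          pvScanB_short _ _ (by simp), pvScanB_short _ _ (by simp [pvS])]
      simp [pvS]
    · obtain ⟨c, d, δ, hδ⟩ := pvS_shape (u :: r) (by simp) hokr
      rw [show (' ' :: [t0, t1] ++ pvS (u :: r)) = ' ' :: t0 :: t1 :: ' ' :: c :: d :: δ from by
            simp [hδ],
          pvScanB_cons5, if_neg (by simp [PySem.Chars.upper, pvUpperChar_space, Char.ext_iff]),
          pvScanB_cons_nospace (hts t0 (by simp)), pvScanB_cons_nospace (hts t1 (by simp))]
      rw [show (' ' :: c :: d :: δ) = pvS (u :: r) from hδ.symm]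
      simp
  rcases t with _ | ⟨t3, t⟩
  · -- t = [t0, t1, t2], the next character is the space heading pvS rest
    obtain ⟨γ, hγ⟩ := pvS_head rest
    rw [show (' ' :: [t0, t1, t2] ++ pvS rest) = ' ' :: t0 :: t1 :: t2 :: ' ' :: γ from by
          simp [hγ],
        pvScanB_cons5, if_neg (by
          intro h
          apply hA
          simp only [PySem.Chars.upper, List.map_cons, List.map_nil, pvUpperChar_space,
            List.cons.injEq, and_true, true_and] at h ⊢
          exact h)]
    have hthrough := pvScanB_through [t0, t1, t2] hts (acc ++ [' ']) (' ' :: γ)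
    simp only [List.cons_append, List.nil_append] at hthrough
    rw [hthrough, show (' ' :: γ) = pvS rest from hγ.symm]
    simp
  · -- |t| ≥ 4: the 5-char window ends inside the token
    rw [show (' ' :: (t0 :: t1 :: t2 :: t3 :: t) ++ pvS rest)
          = ' ' :: t0 :: t1 :: t2 :: t3 :: (t ++ pvS rest) from by simp,
        pvScanB_cons5, if_neg (by
          intro h
          simp only [PySem.Chars.upper, List.map_cons, List.cons.injEq] at h
          exact pvUpperChar_ne_space (hts t3 (by simp)) h.2.2.2.2.1)]
    have hthrough := pvScanB_through (t0 :: t1 :: t2 :: t3 :: t)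
      hts (acc ++ [' ']) (pvS rest)
    simp only [List.cons_append] at hthrough
    rw [hthrough]
    simp

-- the scan over the stream is the token-level scan
theorem pvScanB_S (T : List (List Char)) (hok : ∀ t ∈ T, pvTokOk t) (acc : List Char) :
    pvScanB acc (pvS T) = pvScanTok T acc := by
  induction T generalizing acc with
  | nil =>
    simp only [pvS, pvScanTok]
    rw [pvScanB_short _ _ (by simp)]
  | cons t rest ih =>
    have hokr : ∀ u ∈ rest, pvTokOk u := fun u hu => hok u (List.mem_cons_of_mem _ hu)
    obtain ⟨htne, hsp⟩ := hok t (by simp)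
    have hts : ∀ c ∈ t, c ≠ ' ' := fun c hc => pvNotSpace_of_notSpace (hsp c hc)
    simp only [pvS, pvScanTok]
    by_cases hA : PySem.Chars.upper t = ['A', 'N', 'D']
    · have hlen : t.length = 3 := by
        have := congrArg List.length hA
        simpa [PySem.Chars.upper] using this
      obtain ⟨t0, t1, t2, rfl⟩ := List.length_eq_three.mp hlen
      obtain ⟨γ, hγ⟩ := pvS_head rest
      simp only [PySem.Chars.upper, List.map_cons, List.map_nil, List.cons.injEq,
        and_true] at hA
      rw [show (' ' :: [t0, t1, t2] ++ pvS rest) = ' ' :: t0 :: t1 :: t2 :: ' ' :: γ from by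
            simp [hγ],
          pvScanB_cons5, if_pos (by
            simp [PySem.Chars.upper, pvUpperChar_space, hA.1, hA.2.1, hA.2.2]),
          if_pos (by simp [PySem.Chars.upper, pvUpperChar_space, hA.1, hA.2.1, hA.2.2]),
          show (' ' :: γ) = pvS rest from hγ.symm, ih hokr]
    · rw [pvScanB_space_tok t rest htne hts hA hokr acc, ih hokr, if_neg hA]

-- ---- join and strip facts ----

theorem pvCat_eq (T : List (List Char)) (hT : T ≠ []) :
    pvCat T = ' ' :: PySem.Chars.join [' '] T := by
  induction T with
  | nil => exact absurd rfl hT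
  | cons t rest ih =>
    rcases rest with _ | ⟨u, rest⟩
    · simp [pvCat, PySem.Chars.join_singleton]
    · rw [PySem.Chars.join_cons_cons]
      have : pvCat (t :: u :: rest) = ' ' :: t ++ pvCat (u :: rest) := by simp [pvCat]
      rw [this, ih (by simp)]
      simp

theorem pvCat_append (T : List (List Char)) (t : List Char) :
    pvCat (T ++ [t]) = pvCat T ++ ' ' :: t := by
  simp [pvCat]

theorem pvPad_join (T : List (List Char)) (hT : T ≠ []) :
    ' ' :: PySem.Chars.join [' '] T ++ [' '] = pvS T := by
  induction T with
  | nil => exact absurd rfl hT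
  | cons t rest ih =>
    rcases rest with _ | ⟨u, rest⟩
    · simp [pvS, PySem.Chars.join_singleton]
    · rw [PySem.Chars.join_cons_cons]
      have h := ih (by simp)
      show ' ' :: (t ++ [' '] ++ PySem.Chars.join [' '] (u :: rest)) ++ [' '] = ' ' :: t ++ pvS (u :: rest)
      rw [← h]
      simp

theorem pvStrip_space_cons (x : List Char) :
    PySem.Chars.strip (' ' :: x) = PySem.Chars.strip x := by
  simp [PySem.Chars.strip, PySem.Chars.lstrip,
    show PySem.Chars.isspace ' ' = true from by decide]

theorem pvLstrip_append_space (x : List Char) :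
    PySem.Chars.lstrip (x ++ [' ']) =
      if PySem.Chars.lstrip x = [] then [] else PySem.Chars.lstrip x ++ [' '] := by
  induction x with
  | nil => simp [PySem.Chars.lstrip, List.dropWhile, show PySem.Chars.isspace ' ' = true from by decide]
  | cons c x ih =>
    by_cases hc : PySem.Chars.isspace c = true
    · simpa [PySem.Chars.lstrip, List.dropWhile_cons, hc] using ih
    · simp only [Bool.not_eq_true] at hc
      simp [PySem.Chars.lstrip, List.dropWhile_cons, hc]

theorem pvStrip_append_space (x : List Char) :
    PySem.Chars.strip (x ++ [' ']) = PySem.Chars.strip x := by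
  unfold PySem.Chars.strip
  rw [pvLstrip_append_space]
  by_cases h : PySem.Chars.lstrip x = []
  · simp [h, PySem.Chars.rstrip]
  · rw [if_neg h]
    simp [PySem.Chars.rstrip, List.dropWhile_cons, show PySem.Chars.isspace ' ' = true from by decide]

theorem pvStrip_eq_self (x : List Char) (h1 : ∃ c y, x = c :: y ∧ PySem.Chars.isspace c = false)
    (h2 : ∃ y c, x = y ++ [c] ∧ PySem.Chars.isspace c = false) :
    PySem.Chars.strip x = x := by
  obtain ⟨c, y, hx1, hc⟩ := h1
  obtain ⟨y', c', hx2, hc'⟩ := h2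
  have hl : PySem.Chars.lstrip x = x := by
    rw [hx1]; simp [PySem.Chars.lstrip, List.dropWhile_cons, hc]
  have hr : PySem.Chars.rstrip x = x := by
    rw [hx2]; simp [PySem.Chars.rstrip, List.dropWhile_cons, hc']
  unfold PySem.Chars.strip
  rw [hl, hr]

theorem pvJoin_cons (T : List (List Char)) (hT : T ≠ []) (hok : ∀ t ∈ T, pvTokOk t) :
    ∃ c y, PySem.Chars.join [' '] T = c :: y ∧ PySem.Chars.isspace c = false := by
  rcases T with _ | ⟨t, rest⟩
  · exact absurd rfl hT
  · obtain ⟨ht, hsp⟩ := hok t (by simp)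
    obtain ⟨c, τ, rfl⟩ := List.exists_cons_of_ne_nil ht
    rcases rest with _ | ⟨u, rest⟩
    · exact ⟨c, τ, by simp [PySem.Chars.join_singleton], hsp c (by simp)⟩
    · rw [PySem.Chars.join_cons_cons]
      exact ⟨c, τ ++ [' '] ++ PySem.Chars.join [' '] (u :: rest), by simp, hsp c (by simp)⟩

theorem pvJoin_concat (T : List (List Char)) (hT : T ≠ []) (hok : ∀ t ∈ T, pvTokOk t) :
    ∃ y c, PySem.Chars.join [' '] T = y ++ [c] ∧ PySem.Chars.isspace c = false := by
  induction T with
  | nil => exact absurd rfl hT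
  | cons t rest ih =>
    rcases rest with _ | ⟨u, rest⟩
    · obtain ⟨ht, hsp⟩ := hok t (by simp)
      rcases List.eq_nil_or_concat t with h | ⟨y, c, rfl⟩
      · exact absurd h ht
      · exact ⟨y, c, by simp [PySem.Chars.join_singleton], hsp c (by simp)⟩
    · obtain ⟨y, c, hj, hc⟩ := ih (by simp) (fun v hv => hok v (by simp [hv]))
      refine ⟨t ++ [' '] ++ y, c, ?_, hc⟩
      rw [PySem.Chars.join_cons_cons, hj]
      simp

-- ---- bridges between the two ports' worlds ----

theorem pvIsAnd_iff (t : String) :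
    pvIsAnd t = true ↔ PySem.Chars.upper t.toList = ['A', 'N', 'D'] := by
  rw [pvIsAnd, beq_iff_eq, ← String.toList_inj, PySem.Str.toList_upper]
  have : ("AND" : String).toList = ['A', 'N', 'D'] := by decide
  rw [this]

theorem pvJoin_toList (buf : List String) :
    (PySem.Str.join " " buf).toList = PySem.Chars.join [' '] (buf.map String.toList) := by
  have h := PySem.Str.toList_join " " buf
  simpa [show (" " : String).toList = [' '] from by decide] using h

theorem pvMapOk (buf : List String) (hok : ∀ t ∈ buf, pvTokOk t.toList) :
    ∀ t ∈ buf.map String.toList, pvTokOk t := by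
  intro t ht
  obtain ⟨u, hu, rfl⟩ := List.mem_map.mp ht
  exact hok u hu

theorem pvStripJoin_eq (buf : List String) (hb : buf ≠ [])
    (hok : ∀ t ∈ buf, pvTokOk t.toList) :
    PySem.Chars.strip (PySem.Chars.join [' '] (buf.map String.toList)) =
      PySem.Chars.join [' '] (buf.map String.toList) := by
  have hT : buf.map String.toList ≠ [] := by simpa using hb
  exact pvStrip_eq_self _ (pvJoin_cons _ hT (pvMapOk buf hok)) (pvJoin_concat _ hT (pvMapOk buf hok))

theorem pvStripA_join (buf : List String) (hb : buf ≠ [])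
    (hok : ∀ t ∈ buf, pvTokOk t.toList) :
    pvStripA (PySem.Str.join " " buf) = some (PySem.Str.join " " buf) := by
  have hT : buf.map String.toList ≠ [] := by simpa using hb
  have hstrip : PySem.Str.strip (PySem.Str.join " " buf) = PySem.Str.join " " buf := by
    rw [← String.toList_inj, PySem.Str.toList_strip, pvJoin_toList, pvStripJoin_eq buf hb hok]
  have hne : PySem.Str.join " " buf ≠ "" := by
    intro he
    obtain ⟨c, y, hj, -⟩ := pvJoin_cons _ hT (pvMapOk buf hok)
    rw [← pvJoin_toList, he] at hj
    simp at hj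
  simp [pvStripA, hstrip, hne]

theorem pvPieceB_cat (buf : List String) (hok : ∀ t ∈ buf, pvTokOk t.toList) :
    pvPieceB (pvCat (buf.map String.toList)) =
      if buf.isEmpty then none else some (PySem.Str.join " " buf) := by
  rcases buf with _ | ⟨t, buf⟩
  · simp [pvCat, pvPieceB, PySem.Chars.strip, PySem.Chars.lstrip, PySem.Chars.rstrip]
  · have hb : (t :: buf) ≠ ([] : List String) := by simp
    have hT : (t :: buf).map String.toList ≠ [] := by simp
    rw [pvCat_eq _ hT, pvPieceB, pvStrip_space_cons, pvStripJoin_eq _ hb hok]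
    obtain ⟨c, y, hj, -⟩ := pvJoin_cons _ hT (pvMapOk _ hok)
    rw [hj]
    simp only [List.isEmpty_cons, if_neg Bool.false_ne_true]
    rw [← hj, ← pvJoin_toList, String.ofList_toList]

theorem pvPieceB_append_space (x : List Char) : pvPieceB (x ++ [' ']) = pvPieceB x := by
  simp [pvPieceB, pvStrip_append_space]

theorem pvPieceB_cat_pad (buf : List String) (hok : ∀ t ∈ buf, pvTokOk t.toList) :
    pvPieceB (pvCat (buf.map String.toList) ++ [' ']) =
      if buf.isEmpty then none else some (PySem.Str.join " " buf) := by
  rw [pvPieceB_append_space, pvPieceB_cat buf hok]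

-- the token-level scan followed by strip/filter equals A's buffer loop followed by A's comprehension
theorem pvEmit_eq (ts buf : List String) (hts : ∀ t ∈ ts, pvTokOk t.toList)
    (hbuf : ∀ t ∈ buf, pvTokOk t.toList) :
    (pvScanTok (ts.map String.toList) (pvCat (buf.map String.toList))).filterMap pvPieceB =
      (pvLoopA ts buf).filterMap pvStripA := by
  induction ts generalizing buf with
  | nil =>
    simp only [List.map_nil, pvScanTok, pvLoopA]
    rw [List.filterMap_cons, List.filterMap_nil, pvPieceB_cat_pad buf hbuf]
    rcases buf with _ | ⟨t, buf⟩
    · simp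
    · simp [List.filterMap_cons, pvStripA_join (t :: buf) (by simp) hbuf]
  | cons t ts ih =>
    have hts' : ∀ u ∈ ts, pvTokOk u.toList := fun u hu => hts u (List.mem_cons_of_mem _ hu)
    simp only [List.map_cons, pvScanTok, pvLoopA]
    by_cases hA : pvIsAnd t = true
    · rw [if_pos ((pvIsAnd_iff t).mp hA), if_pos hA, List.filterMap_cons,
          List.filterMap_append, pvPieceB_cat buf hbuf]
      have hIH := ih (buf := []) hts' (by simp)
      simp only [List.map_nil, pvCat, List.flatten_nil] at hIH
      rw [hIH]
      rcases buf with _ | ⟨u, buf⟩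
      · simp
      · simp [List.filterMap_cons, pvStripA_join (u :: buf) (by simp) hbuf]
    · have hA' : ¬ PySem.Chars.upper t.toList = ['A', 'N', 'D'] :=
        fun h => hA ((pvIsAnd_iff t).mpr h)
      rw [if_neg hA', if_neg hA]
      have hcat : pvCat (buf.map String.toList) ++ ' ' :: t.toList
          = pvCat ((buf ++ [t]).map String.toList) := by
        rw [List.map_append, List.map_singleton, pvCat_append]
      rw [hcat]
      refine ih (buf := buf ++ [t]) hts' ?_
      intro u hu
      rcases List.mem_append.mp hu with h | h
      · exact hbuf u h
      · rw [List.mem_singleton.mp h]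
        exact hts t (by simp)

-- tokens produced by str.split() are non-empty and whitespace-free
theorem pvGo_ok (s cur acc : _) (hc : ∀ c ∈ cur, PySem.Chars.isspace c = false)
    (ha : ∀ u ∈ acc, pvTokOk u) : ∀ u ∈ PySem.Chars.split₀.go s cur acc, pvTokOk u := by
  induction s generalizing cur acc with
  | nil =>
    intro u hu
    simp only [PySem.Chars.split₀.go] at hu
    split at hu
    · exact ha u (by simpa using hu)
    · rename_i hcur
      rw [List.mem_reverse] at hu
      rcases List.mem_cons.mp hu with h | h
      · subst h
        refine ⟨by simpa [List.isEmpty_iff] using hcur, ?_⟩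
        intro c hcu
        exact hc c (by simpa using hcu)
      · exact ha u h
  | cons c s ih =>
    intro u hu
    simp only [PySem.Chars.split₀.go] at hu
    split at hu
    · split at hu
      · exact ih [] acc (by simp) ha u hu
      · rename_i hcur
        refine ih [] (cur.reverse :: acc) (by simp) ?_ u hu
        intro v hv
        rcases List.mem_cons.mp hv with h | h
        · subst h
          refine ⟨by simpa [List.isEmpty_iff] using hcur, ?_⟩
          intro d hd
          exact hc d (by simpa using hd)
        · exact ha v h
    · rename_i hcs
      refine ih (c :: cur) acc ?_ ha u hu
      intro d hd
      rcases List.mem_cons.mp hd with h | h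
      · subst h; simpa using hcs
      · exact hc d h

theorem pvSplit₀_ok (s : String) : ∀ t ∈ PySem.Str.split₀ s, pvTokOk t.toList := by
  intro t ht
  have : t.toList ∈ PySem.Chars.split₀ s.toList := by
    rw [← PySem.Str.split₀_map_toList]
    exact List.mem_map_of_mem ht
  exact pvGo_ok s.toList [] [] (by simp) (by simp) t.toList (by simpa [PySem.Chars.split₀] using this)

-- ===== VERDICT (by name: the statement is the Claim_ definition above) =====
theorem split_conjuncts_py_spec : Claim_equal_split_conjuncts_py := by
  intro pred _
  unfold Spec_split_conjuncts_py
  simp only [split_conjuncts_py, split_conjuncts_py_alt]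
  have hok := pvSplit₀_ok (PySem.Str.replace pred "&&" "AND")
  rcases hT : PySem.Str.split₀ (PySem.Str.replace pred "&&" "AND") with _ | ⟨t, ts⟩
  · rw [hT] at hok
    have hjoin : (PySem.Str.join " " ([] : List String)).toList = [] := by
      rw [pvJoin_toList]
      simp [PySem.Chars.join_nil]
    rw [hjoin, pvScanB_short _ _ (by simp)]
    simp [pvLoopA, pvPieceB, show PySem.Chars.strip [' ', ' '] = [] from by decide]
  · rw [hT] at hok
    have hTne : (t :: ts).map String.toList ≠ [] := by simp
    have hchain : ' ' :: (PySem.Str.join " " (t :: ts)).toList ++ [' ']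
        = pvS ((t :: ts).map String.toList) := by
      rw [pvJoin_toList, pvPad_join _ hTne]
    rw [hchain, pvScanB_S _ (pvMapOk _ hok) []]
    have h := pvEmit_eq (t :: ts) [] hok (by simp)
    simpa [pvCat] using h.symm
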